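-- pv_equiv track=rewrite | github.com/Pashabrrrr/Urban_Python | module_2_hard.py | password_selection
-- ===== SOURCE A (Python) =====
-- def password_selection(n):
--     if n < 3 or n > 20:
--         x = ("Вас предупреждали! От шипов никому не уйти!")
--         return x
--     else:
--         pass_ = str("")
--         for i in range(1, 21):
--             if i != n:
--                 for j in range(1, 21):
--                     if j != n and j > i and n % (i + j) == 0:
--                         pass_ = pass_ + str(i) + str(j)
--                     else:
--                         continue
--             else:
--                 continue
--         return pass_
-- ===== SOURCE B (Python) =====
-- def password_selection(n):
--     if n < 3 or n > 20:
--         return "Вас предупреждали! От шипов никому не уйти!"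
--     pairs = []
--     for s in range(3, n + 1):
--         if n % s == 0:
--             for i in range(1, (s + 1) // 2):
--                 pairs.append((i, s - i))
--     pairs.sort()
--     return "".join(str(i) + str(j) for i, j in pairs)
-- ===== Notes on version B (the rewrite author's own statement) =====
-- stated objective: alternative
-- what changed: B enumerates, for each divisor s of n in the admitted band, the pairs (i, s-i) with i < s-i, then sorts the collected pairs lexicographically and joins them, instead of A's fixed double scan over all candidate pairs testing divisibility of n by i+j.
import Mathlib
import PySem

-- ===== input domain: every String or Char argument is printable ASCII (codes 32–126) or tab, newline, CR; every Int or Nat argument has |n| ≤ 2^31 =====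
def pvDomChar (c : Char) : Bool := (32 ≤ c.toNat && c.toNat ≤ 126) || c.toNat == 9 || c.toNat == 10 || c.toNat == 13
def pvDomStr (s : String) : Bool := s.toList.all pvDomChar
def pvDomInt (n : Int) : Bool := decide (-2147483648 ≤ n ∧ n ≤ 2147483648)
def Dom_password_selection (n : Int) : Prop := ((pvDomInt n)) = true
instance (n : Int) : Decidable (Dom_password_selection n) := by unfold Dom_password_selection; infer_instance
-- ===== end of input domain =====

set_option maxRecDepth 4000


-- B replaces A's 400-iteration double scan over 1..20 by collecting, for each divisor s≥3 of n,
-- the pairs (i, s-i) with i < s-i, then sorting them; objective: alternative (clearer, fewer iterations).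

-- ===== PORT A =====
def password_selection (n : Int) : String :=
  if n < 3 ∨ n > 20 then
    "Вас предупреждали! От шипов никому не уйти!"
  else
    (PySem.List.pyRange 1 21 1).foldl (fun pass_ i =>
      if i ≠ n then
        (PySem.List.pyRange 1 21 1).foldl (fun p j =>
          if j ≠ n ∧ j > i ∧ PySem.Int.mod n (i + j) = 0 then
            p ++ PySem.Int.toStr i ++ PySem.Int.toStr j
          else p) pass_
      else pass_) ""

-- ===== PORT B =====
def password_selection_alt (n : Int) : String :=
  if n < 3 ∨ n > 20 then
    "Вас предупреждали! От шипов никому не уйти!"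
  else
    let pairs : List (Int × Int) :=
      (PySem.List.pyRange 3 (n + 1) 1).foldl (fun acc s =>
        if PySem.Int.mod n s = 0 then
          acc ++ (PySem.List.pyRange 1 (PySem.Int.floordiv (s + 1) 2) 1).map (fun i => (i, s - i))
        else acc) []
    let sorted := PySem.List.sorted2 pairs (fun p => p.1) (fun p => p.2)
    PySem.Str.join "" (sorted.map (fun p => PySem.Int.toStr p.1 ++ PySem.Int.toStr p.2))

-- ===== PRECONDITION & SPEC =====
def Spec_password_selection (n : Int) (out : String) : Prop := out = password_selection_alt n
instance (n : Int) (out : String) : Decidable (Spec_password_selection n out) := by unfold Spec_password_selection; infer_instance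

-- ===== CLAIM (what is proved, stated in full; the proofs are below) =====
def Claim_equal_password_selection : Prop := ∀ (n : Int), Dom_password_selection n → Spec_password_selection n (password_selection n)

-- ===== LEMMAS AND PROOFS =====
theorem password_selection_eq (n : Int) : password_selection n = password_selection_alt n := by
  by_cases h : n < 3 ∨ n > 20
  · simp [password_selection, password_selection_alt, h]
  · push Not at h
    obtain ⟨h1, h2⟩ := h
    interval_cases n <;> decide

-- ===== VERDICT (by name: the statement is the Claim_ definition above) =====
theorem password_selection_spec : Claim_equal_password_selection := by
  intro n _
  exact password_selection_eq n
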